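-- pv_equiv track=rewrite | github.com/roypark2638/Algorithm-LeetCode | AlphabetBoardPath.py | alphabetBoardPath
-- ===== SOURCE A (Python) =====
-- def alphabetBoardPath(target):
--     board = ["abcde", "fghij", "klmno", "pqrst", "uvwxy", "z"]
--     boardMap = {}
--     for row in range(len(board)):  # Time O(1) constant
--         for col in range(len(board[row])):
--             boardMap[board[row][col]] = (row, col)
--
--     currentIndex = (0, 0)
--     res = ""
--     for char in target:  # Time O(n)
--         targetIndex = boardMap[char]
--         # Time O(1)  Space O(n)
--         res += movePositionAndUpdateString(currentIndex, targetIndex)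
--         currentIndex = targetIndex
--     return res
--
-- def movePositionAndUpdateString(currentIndex, targetIndex):
--     currentRow, currentCol = currentIndex
--     targetRow, targetCol = targetIndex
--     str = ""
--     ups = max(0, currentRow - targetRow)
--     lefts = max(0, currentCol - targetCol)
--     rights = max(0, targetCol - currentCol)
--     downs = max(0, targetRow - currentRow)
--     str += "U" * ups + "L" * lefts + "D" * downs + "R" * rights + "!"
--
--     return str
-- ===== SOURCE B (Python) =====
-- def alphabetBoardPath(target):
--     # Step-by-step simulation: walk one square at a time (priority U, L, D, R)
--     # instead of counting moves arithmetically from a precomputed board table.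
--     out = []
--     r = c = 0
--     for ch in target:
--         tr, tc = divmod(ord(ch) - 97, 5)
--         while (r, c) != (tr, tc):
--             if r > tr:
--                 out.append('U'); r -= 1
--             elif c > tc:
--                 out.append('L'); c -= 1
--             elif r < tr:
--                 out.append('D'); r += 1
--             else:
--                 out.append('R'); c += 1
--         out.append('!')
--     return ''.join(out)
-- ===== Notes on version B (the rewrite author's own statement) =====
-- stated objective: alternative
-- what changed: Replaces the board-table lookup plus arithmetic move counting ('U'*ups + ... built by repeated string concatenation) with closed-form divmod addressing and a one-square-at-a-time walk simulation (while loop, priority U,L,D,R) appending single characters to a list joined once at the end.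
-- outside the precondition, e.g. on alphabetBoardPath('aA'): A raises KeyError, B returns '!UUUUUUURRR!'
import Mathlib
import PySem

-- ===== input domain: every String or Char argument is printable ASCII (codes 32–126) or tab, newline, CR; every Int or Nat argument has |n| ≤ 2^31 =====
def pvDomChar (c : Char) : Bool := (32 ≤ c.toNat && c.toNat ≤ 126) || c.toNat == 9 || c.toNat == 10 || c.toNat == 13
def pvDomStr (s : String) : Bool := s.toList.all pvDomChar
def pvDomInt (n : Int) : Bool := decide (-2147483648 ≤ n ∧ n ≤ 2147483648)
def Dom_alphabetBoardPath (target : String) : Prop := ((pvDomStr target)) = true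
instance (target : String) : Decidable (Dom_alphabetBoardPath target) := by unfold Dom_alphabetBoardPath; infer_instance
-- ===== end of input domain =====

-- B replaces the board table and arithmetic move counting by a one-square-at-a-time walk
-- simulation with closed-form divmod addressing; same result on all lowercase inputs.

-- ===== PORT A =====
def pvBoard : List String := ["abcde", "fghij", "klmno", "pqrst", "uvwxy", "z"]

-- boardMap built by the same nested range loops over the board
def pvBoardMap : PySem.Dict Char (Int × Int) :=
  (List.range pvBoard.length).foldl (fun d row =>
    (List.range (pvBoard.getD row "").toList.length).foldl (fun d2 col =>
      PySem.Dict.insert d2 ((pvBoard.getD row "").toList.getD col ' ') ((row : Int), (col : Int))) d)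
    PySem.Dict.empty

-- movePositionAndUpdateString, on List Char (strings ported through toList)
def pvMove (cur tgt : Int × Int) : List Char :=
  let ups := max 0 (cur.1 - tgt.1)
  let lefts := max 0 (cur.2 - tgt.2)
  let rights := max 0 (tgt.2 - cur.2)
  let downs := max 0 (tgt.1 - cur.1)
  ([] : List Char) ++ PySem.List.pyRepeat ['U'] ups ++ PySem.List.pyRepeat ['L'] lefts
    ++ PySem.List.pyRepeat ['D'] downs ++ PySem.List.pyRepeat ['R'] rights ++ ['!']

-- boardMap[char] raises KeyError outside Pre_; the .getD (0,0) default is never reached inside Pre_.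
def alphabetBoardPath (target : String) : String :=
  String.ofList
    ((target.toList.foldl
      (fun (st : (Int × Int) × List Char) ch =>
        let tgt := (PySem.Dict.get? pvBoardMap ch).getD (0, 0)
        (tgt, st.2 ++ pvMove st.1 tgt))
      ((0, 0), [])).2)

-- ===== PORT B =====
-- divmod(ord(ch) - 97, 5)
def pvPos (ch : Char) : Int × Int :=
  (PySem.Int.floordiv ((ch.toNat : Int) - 97) 5, PySem.Int.mod ((ch.toNat : Int) - 97) 5)

-- B's while loop: move one square per iteration, priority U, L, D, R.
-- The Nat fuel is only a structural totality guard; it equals the exact number of steps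
-- the Python while loop performs, so the 0-fuel base case is never the reason the loop stops.
def pvWalkAux : Nat → Int → Int → Int → Int → List Char
  | 0, _, _, _, _ => []
  | n + 1, r, c, tr, tc =>
    if r > tr then 'U' :: pvWalkAux n (r - 1) c tr tc
    else if c > tc then 'L' :: pvWalkAux n r (c - 1) tr tc
    else if r < tr then 'D' :: pvWalkAux n (r + 1) c tr tc
    else if c < tc then 'R' :: pvWalkAux n r (c + 1) tr tc
    else []

def pvWalk (r c tr tc : Int) : List Char :=
  pvWalkAux ((r - tr).natAbs + (c - tc).natAbs) r c tr tc

def alphabetBoardPath_alt (target : String) : String :=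
  String.ofList
    ((target.toList.foldl
      (fun (st : (Int × Int) × List Char) ch =>
        let t := pvPos ch
        (t, st.2 ++ pvWalk st.1.1 st.1.2 t.1 t.2 ++ ['!']))
      ((0, 0), [])).2)

-- ===== PRECONDITION & SPEC =====
-- Pre_ excludes exactly the inputs containing a character that is not a lowercase letter, on which A raises KeyError.
def pvLetters : List Char := ['a', 'b', 'c', 'd', 'e', 'f', 'g', 'h', 'i', 'j', 'k', 'l', 'm', 'n', 'o', 'p', 'q', 'r', 's', 't', 'u', 'v', 'w', 'x', 'y', 'z']
def Pre_alphabetBoardPath (target : String) : Prop :=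
  target.toList.all (fun c => c ∈ pvLetters) = true
instance (target : String) : Decidable (Pre_alphabetBoardPath target) := by
  unfold Pre_alphabetBoardPath; infer_instance
def pvWitness_alphabetBoardPath : String := "ab"

def Spec_alphabetBoardPath (target : String) (out : String) : Prop := out = alphabetBoardPath_alt target
instance (target : String) (out : String) : Decidable (Spec_alphabetBoardPath target out) := by unfold Spec_alphabetBoardPath; infer_instance

-- ===== CLAIM (what is proved, stated in full; the proofs are below) =====
def Claim_equal_alphabetBoardPath : Prop := ∀ (target : String), Dom_alphabetBoardPath target → Pre_alphabetBoardPath target → Spec_alphabetBoardPath target (alphabetBoardPath target)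

-- ===== LEMMAS AND PROOFS =====

-- the table lookup agrees with the closed form on every lowercase letter
set_option maxRecDepth 8000 in
lemma lookup_eq_pos : ∀ c ∈ pvLetters,
    (PySem.Dict.get? pvBoardMap c).getD (0, 0) = pvPos c := by
  intro c hc
  fin_cases hc <;> decide

-- the walk emits exactly ups 'U's, then lefts 'L's, then downs 'D's, then rights 'R's
lemma walkAux_eq : ∀ (n : Nat) (r c tr tc : Int), (r - tr).natAbs + (c - tc).natAbs ≤ n →
    pvWalkAux n r c tr tc =
      List.replicate (max 0 (r - tr)).toNat 'U' ++ List.replicate (max 0 (c - tc)).toNat 'L'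
        ++ List.replicate (max 0 (tr - r)).toNat 'D' ++ List.replicate (max 0 (tc - c)).toNat 'R' := by
  intro n
  induction n with
  | zero =>
    intro r c tr tc h
    have e1 : (max 0 (r - tr)).toNat = 0 := by omega
    have e2 : (max 0 (c - tc)).toNat = 0 := by omega
    have e3 : (max 0 (tr - r)).toNat = 0 := by omega
    have e4 : (max 0 (tc - c)).toNat = 0 := by omega
    simp [pvWalkAux, e1, e2, e3, e4]
  | succ n ih =>
    intro r c tr tc h
    rw [pvWalkAux]
    split_ifs with h1 h2 h3 h4
    · rw [ih (r - 1) c tr tc (by omega)]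
      have e1 : (max 0 (r - tr)).toNat = (max 0 (r - 1 - tr)).toNat + 1 := by omega
      have e2 : (max 0 (tr - r)).toNat = (max 0 (tr - (r - 1))).toNat := by omega
      rw [e1, e2, List.replicate_succ]
      simp
    · rw [ih r (c - 1) tr tc (by omega)]
      have e1 : (max 0 (c - tc)).toNat = (max 0 (c - 1 - tc)).toNat + 1 := by omega
      have e2 : (max 0 (r - tr)).toNat = 0 := by omega
      have e3 : (max 0 (tc - c)).toNat = (max 0 (tc - (c - 1))).toNat := by omega
      rw [e1, e3, List.replicate_succ]
      simp [e2]
    · rw [ih (r + 1) c tr tc (by omega)]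
      have e1 : (max 0 (tr - r)).toNat = (max 0 (tr - (r + 1))).toNat + 1 := by omega
      have e2 : (max 0 (r - tr)).toNat = 0 := by omega
      have e3 : (max 0 (c - tc)).toNat = 0 := by omega
      have e4 : (max 0 (r + 1 - tr)).toNat = 0 := by omega
      rw [e1, List.replicate_succ]
      simp [e2, e3, e4]
    · rw [ih r (c + 1) tr tc (by omega)]
      have e1 : (max 0 (tc - c)).toNat = (max 0 (tc - (c + 1))).toNat + 1 := by omega
      have e2 : (max 0 (r - tr)).toNat = 0 := by omega
      have e3 : (max 0 (c - tc)).toNat = 0 := by omega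
      have e4 : (max 0 (tr - r)).toNat = 0 := by omega
      have e5 : (max 0 (c + 1 - tc)).toNat = 0 := by omega
      rw [e1, List.replicate_succ]
      simp [e2, e3, e4, e5]
    · have e2 : (max 0 (r - tr)).toNat = 0 := by omega
      have e3 : (max 0 (c - tc)).toNat = 0 := by omega
      have e4 : (max 0 (tr - r)).toNat = 0 := by omega
      have e5 : (max 0 (tc - c)).toNat = 0 := by omega
      simp [e2, e3, e4, e5]

lemma walk_eq (r c tr tc : Int) :
    pvWalk r c tr tc =
      List.replicate (max 0 (r - tr)).toNat 'U' ++ List.replicate (max 0 (c - tc)).toNat 'L'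
        ++ List.replicate (max 0 (tr - r)).toNat 'D' ++ List.replicate (max 0 (tc - c)).toNat 'R' :=
  walkAux_eq _ r c tr tc le_rfl

-- A's counted move string per character equals B's stepwise walk plus '!'
lemma move_eq_walk (cur tgt : Int × Int) :
    pvMove cur tgt = pvWalk cur.1 cur.2 tgt.1 tgt.2 ++ ['!'] := by
  rw [walk_eq]
  simp [pvMove, PySem.List.pyRepeat_singleton]

-- the two folds agree step by step on lowercase input
lemma folds_eq (cs : List Char) (h : ∀ c ∈ cs, c ∈ pvLetters) :
    ∀ (cur : Int × Int) (res : List Char),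
      (cs.foldl
        (fun (st : (Int × Int) × List Char) ch =>
          let tgt := (PySem.Dict.get? pvBoardMap ch).getD (0, 0)
          (tgt, st.2 ++ pvMove st.1 tgt))
        (cur, res)).2
      = (cs.foldl
        (fun (st : (Int × Int) × List Char) ch =>
          let t := pvPos ch
          (t, st.2 ++ pvWalk st.1.1 st.1.2 t.1 t.2 ++ ['!']))
        (cur, res)).2 := by
  induction cs with
  | nil => intro cur res; rfl
  | cons ch rest ih =>
    intro cur res
    have hc := h ch (List.mem_cons_self ..)
    have hrest : ∀ c ∈ rest, c ∈ pvLetters :=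
      fun c hm => h c (List.mem_cons_of_mem _ hm)
    simp only [List.foldl_cons]
    rw [lookup_eq_pos ch hc, move_eq_walk]
    simp only [← List.append_assoc]
    exact ih hrest (pvPos ch) _

-- ===== VERDICT (by name: the statement is the Claim_ definition above) =====
theorem alphabetBoardPath_spec : Claim_equal_alphabetBoardPath := by
  intro target _ hpre
  unfold Pre_alphabetBoardPath at hpre
  simp only [List.all_eq_true, decide_eq_true_eq] at hpre
  unfold Spec_alphabetBoardPath alphabetBoardPath alphabetBoardPath_alt
  rw [folds_eq target.toList hpre]
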